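-- pv_equiv track=rewrite | github.com/d3cao/Projetos_python | lista 4/ex1557.py | cria_matriz
-- ===== SOURCE A (Python) =====
-- def cria_matriz(num):
--     matriz = [[1]*num for _ in range(num)]
--     for i in range(num):
--         for j in range(num):
--             if i != 0:
--                 matriz[i][0] = matriz[i-1][1]
--             if j != 0:
--                 matriz[i][j] = matriz[i][j-1]*2
--     return matriz
-- ===== SOURCE B (Python) =====
-- def cria_matriz(num):
--     return [[2 ** (i + j) for j in range(num)] for i in range(num)]
-- ===== Notes on version B (the rewrite author's own statement) =====
-- stated objective: simpler
-- what changed: Each cell is computed independently by the closed form two**(i+j) instead of propagating values across cells (copying the previous row's second element and doubling the left neighbour).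
import Mathlib
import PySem

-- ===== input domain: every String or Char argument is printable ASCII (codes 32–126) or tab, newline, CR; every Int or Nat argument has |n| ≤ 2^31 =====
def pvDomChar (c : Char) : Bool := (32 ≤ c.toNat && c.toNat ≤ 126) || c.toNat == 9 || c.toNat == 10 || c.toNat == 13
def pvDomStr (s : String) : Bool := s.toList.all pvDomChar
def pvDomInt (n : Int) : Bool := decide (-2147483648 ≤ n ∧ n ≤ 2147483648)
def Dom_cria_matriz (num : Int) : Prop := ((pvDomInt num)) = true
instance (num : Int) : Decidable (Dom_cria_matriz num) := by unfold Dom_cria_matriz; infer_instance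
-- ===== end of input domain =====

-- B replaces A's cross-cell propagation (copying the previous row's second element and
-- doubling the left neighbour) by computing each cell independently as 2^(i+j).

-- ===== PORT A =====
-- matriz[i][j] = v  (i, j are the nonnegative loop indices from range(num))
def pvSetCell (m : List (List Int)) (i j : Int) (v : Int) : List (List Int) :=
  PySem.List.pySetD m i (PySem.List.pySetD (PySem.List.pyGetD m i []) j v)

-- body of the inner 'for j' loop
def pvInner (i : Int) (m : List (List Int)) (j : Int) : List (List Int) :=
  let m1 := if i ≠ 0 then
      pvSetCell m i 0 (PySem.List.pyGetD (PySem.List.pyGetD m (i - 1) []) 1 0)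
    else m
  if j ≠ 0 then
    pvSetCell m1 i j (PySem.List.pyGetD (PySem.List.pyGetD m1 i []) (j - 1) 0 * 2)
  else m1

-- body of the outer 'for i' loop
def pvOuter (num : Int) (m : List (List Int)) (i : Int) : List (List Int) :=
  (PySem.List.pyRange 0 num 1).foldl (pvInner i) m

def cria_matriz (num : Int) : List (List Int) :=
  (PySem.List.pyRange 0 num 1).foldl (pvOuter num)
    ((PySem.List.pyRange 0 num 1).map (fun _ => List.replicate num.toNat 1))

-- ===== PORT B =====
def cria_matriz_alt (num : Int) : List (List Int) :=
  (PySem.List.pyRange 0 num 1).map (fun i =>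
    (PySem.List.pyRange 0 num 1).map (fun j => (2 : Int) ^ (i + j).toNat))

-- ===== PRECONDITION & SPEC =====
def Spec_cria_matriz (num : Int) (out : List (List Int)) : Prop := out = cria_matriz_alt num
instance (num : Int) (out : List (List Int)) : Decidable (Spec_cria_matriz num out) := by unfold Spec_cria_matriz; infer_instance

-- ===== CLAIM (what is proved, stated in full; the proofs are below) =====
def Claim_equal_cria_matriz : Prop := ∀ (num : Int), Dom_cria_matriz num → Spec_cria_matriz num (cria_matriz num)


-- ===== LEMMAS AND PROOFS =====

-- row i after its first k inner iterations: prefix of powers 2^(i+t), rest still 1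
def rUp (it n k : Nat) : List Int :=
  (List.range n).map (fun t => if t < k then (2:Int)^(it+t) else 1)

theorem rUp_zero (it n : Nat) : rUp it n 0 = List.replicate n 1 := by
  simp [rUp]

theorem length_rUp (it n k : Nat) : (rUp it n k).length = n := by simp [rUp]

theorem rUp_one_zero (n : Nat) : rUp 0 n 1 = rUp 0 n 0 := by
  apply List.map_congr_left
  intro t ht
  by_cases h : t = 0
  · subst h; simp
  · simp [show ¬ t < 1 by omega, show ¬ t < 0 by omega]

theorem set0_rUp (it n k : Nat) (hk : 1 ≤ k) (hn : 0 < n) :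
    (rUp it n k).set 0 ((2:Int)^it) = rUp it n k := by
  apply List.ext_getElem
  · simp
  · intro t h1 h2
    simp only [List.getElem_set, rUp, List.getElem_map, List.getElem_range]
    split_ifs with h h' h'' <;> first | rfl | omega | (subst h; simp)

theorem step0_rUp (it n : Nat) (hn : 0 < n) :
    (rUp it n 0).set 0 ((2:Int)^it) = rUp it n 1 := by
  apply List.ext_getElem
  · simp [rUp]
  · intro t h1 h2
    simp only [List.getElem_set, rUp, List.getElem_map, List.getElem_range]
    split_ifs with h h' h'' <;> first | rfl | omega | (subst h; simp) | simp

theorem stepj_rUp (it n jt : Nat) (h1 : 1 ≤ jt) (h2 : jt < n) :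
    (rUp it n jt).set jt (PySem.List.pyGetD (rUp it n jt) ((jt:Int)-1) 0 * 2) = rUp it n (jt+1) := by
  have hcast : ((jt:Int) - 1) = ((jt - 1 : Nat) : Int) := by omega
  have hget : PySem.List.pyGetD (rUp it n jt) ((jt:Int)-1) 0 = (2:Int)^(it + (jt-1)) := by
    rw [hcast, PySem.List.pyGetD_natCast,
        List.getD_eq_getElem _ _ (by simp [rUp]; omega)]
    simp only [rUp, List.getElem_map, List.getElem_range]
    simp [show jt - 1 < jt by omega]
  rw [hget]
  apply List.ext_getElem
  · simp [rUp]
  · intro t ha hb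
    simp only [List.getElem_set, rUp, List.getElem_map, List.getElem_range]
    rcases lt_trichotomy t jt with h | h | h
    · simp [show ¬ jt = t by omega, h, show t < jt + 1 by omega]
    · subst h
      simp only [if_pos rfl, if_pos (Nat.lt_succ_self t)]
      rw [show it + t = (it + (t - 1)) + 1 from by omega, pow_succ]; simp
    · simp [show ¬ jt = t by omega, show ¬ t < jt by omega, show ¬ t < jt + 1 by omega]

-- what one inner-loop iteration does to row i, given p = the value read from the previous row
def rowStep (it : Nat) (p : Int) (r : List Int) (jt : Nat) : List Int :=
  let r1 := if it ≠ 0 then r.set 0 p else r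
  if jt ≠ 0 then r1.set jt (PySem.List.pyGetD r1 ((jt:Int)-1) 0 * 2) else r1

-- pvInner on a matrix split as done ++ r :: rest, where done.length = i: only row i changes
theorem pvInner_factor (it jt : Nat) (done rest : List (List Int)) (r : List Int)
    (hd : done.length = it) :
    pvInner (it:Int) (done ++ r :: rest) (jt:Int) =
      done ++ rowStep it (PySem.List.pyGetD (PySem.List.pyGetD done ((it:Int)-1) []) 1 0) r jt :: rest := by
  subst hd
  have hget : ∀ x : List Int, PySem.List.pyGetD (done ++ x :: rest) ((done.length : Int)) [] = x := by
    intro x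
    rw [PySem.List.pyGetD_natCast]
    simp [List.getD_eq_getElem?_getD, List.getElem?_append_right (Nat.le_refl _)]
  have hset : ∀ (x v : List Int),
      PySem.List.pySetD (done ++ x :: rest) ((done.length : Int)) v = done ++ v :: rest := by
    intro x v
    rw [PySem.List.pySetD_natCast, List.set_append_right _ _ (Nat.le_refl _)]
    simp
  have hsetr : ∀ (x : List Int) (v : Int), PySem.List.pySetD x (0:Int) v = x.set 0 v := by
    intro x v
    rw [PySem.List.pySetD_of_nonneg x v le_rfl]
    rfl
  have hsetj : ∀ (x : List Int) (v : Int), PySem.List.pySetD x ((jt:Nat):Int) v = x.set jt v := by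
    intro x v
    exact PySem.List.pySetD_natCast x jt v
  have hprevread : ∀ x : List Int, done.length ≠ 0 →
      PySem.List.pyGetD (done ++ x :: rest) ((done.length : Int) - 1) []
        = PySem.List.pyGetD done ((done.length : Int) - 1) [] := by
    intro x h
    have hc : ((done.length : Int) - 1) = ((done.length - 1 : Nat) : Int) := by omega
    rw [hc, PySem.List.pyGetD_natCast, PySem.List.pyGetD_natCast,
        List.getD_eq_getElem?_getD, List.getD_eq_getElem?_getD,
        List.getElem?_append_left (by omega)]
  by_cases hi : done.length = 0
  · obtain rfl : done = [] := List.length_eq_zero_iff.mp hi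
    simp only [pvInner, pvSetCell, rowStep, List.nil_append, List.length_nil, Nat.cast_zero,
      ne_eq, not_true_eq_false, if_false, ite_not]
    by_cases hj : jt = 0
    · subst hj; simp
    · have hjj : ((jt:Nat):Int) ≠ 0 := by exact_mod_cast hj
      simp only [hjj, hj, if_neg, ite_false]
      rw [PySem.List.pyGetD_zero_cons, hsetj,
          PySem.List.pySetD_of_nonneg _ _ (by norm_num)]
      simp [hj, hjj]
  · have hii : ((done.length:Nat):Int) ≠ 0 := by exact_mod_cast hi
    simp only [pvInner, pvSetCell, rowStep, ne_eq, hii, not_false_eq_true, if_true, ite_true,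
      hi, hprevread r hi]
    rw [hget r, hsetr, hset r]
    by_cases hj : jt = 0
    · subst hj; simp
    · have hjj : ((jt:Nat):Int) ≠ 0 := by exact_mod_cast hj
      simp only [hjj, hj, not_false_eq_true, if_true, ite_true]
      rw [hget _, hsetj, hset _]

-- one inner iteration carries row i from stage k to stage k+1
theorem rowStep_spec (it n k : Nat) (hit : it < n) (hk : k < n) (p : Int)
    (hp : it ≠ 0 → p = (2:Int)^it) :
    rowStep it p (if k = 0 then List.replicate n 1 else rUp it n k) k = rUp it n (k+1) := by
  have hn : 0 < n := by omega
  by_cases hk0 : k = 0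
  · subst hk0
    by_cases hi : it = 0
    · subst hi
      simp [rowStep, ← rUp_zero 0 n, rUp_one_zero n]
    · simp only [rowStep, if_pos rfl]
      simp [hi, hp hi, ← rUp_zero it n, step0_rUp it n hn]
  · by_cases hi : it = 0
    · subst hi
      simp only [rowStep, if_neg hk0]
      simp [hk0]
      exact stepj_rUp 0 n k (by omega) hk
    · simp only [rowStep, if_neg hk0]
      simp [hk0, hi, hp hi, set0_rUp it n k (by omega) hn]
      exact stepj_rUp it n k (by omega) hk

-- the whole inner loop (j from 0 to k) on a matrix whose row i is still all ones
theorem inner_fold (n it : Nat) (done rest : List (List Int))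
    (hd : done.length = it) (hit : it < n)
    (hprev : it ≠ 0 → PySem.List.pyGetD (PySem.List.pyGetD done ((it:Int)-1) []) 1 0 = (2:Int)^it) :
    ∀ k, k ≤ n →
      (PySem.List.pyRange 0 (k:Int) 1).foldl (pvInner (it:Int)) (done ++ List.replicate n 1 :: rest)
        = done ++ (if k = 0 then List.replicate n 1 else rUp it n k) :: rest := by
  intro k
  induction k with
  | zero => intro _; simp [PySem.List.pyRange_one_eq_nil le_rfl]
  | succ k ih =>
    intro hkn
    have hsplit : PySem.List.pyRange 0 ((k+1:Nat):Int) 1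
        = PySem.List.pyRange 0 (k:Int) 1 ++ [(k:Int)] := by
      rw [show ((k+1:Nat):Int) = (k:Int) + 1 by push_cast; ring]
      exact PySem.List.pyRange_one_succ_right (by positivity)
    rw [hsplit, List.foldl_append, ih (by omega)]
    simp only [List.foldl_cons, List.foldl_nil]
    rw [pvInner_factor it k done rest _ hd]
    congr 1
    have hrs := rowStep_spec it n k hit (by omega)
      (PySem.List.pyGetD (PySem.List.pyGetD done ((it:Int)-1) []) 1 0) hprev
    rw [hrs]
    simp

-- the outer loop: after m rows, the first m rows are finished, the rest are all ones
theorem outer_fold (n : Nat) :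
    ∀ m, m ≤ n →
      (PySem.List.pyRange 0 (m:Int) 1).foldl (pvOuter (n:Int))
          (List.replicate n (List.replicate n 1))
        = ((List.range m).map (fun it => rUp it n n))
            ++ List.replicate (n - m) (List.replicate n 1) := by
  intro m
  induction m with
  | zero => intro _; simp [PySem.List.pyRange_one_eq_nil le_rfl]
  | succ m ih =>
    intro hmn
    have hsplit : PySem.List.pyRange 0 ((m+1:Nat):Int) 1
        = PySem.List.pyRange 0 (m:Int) 1 ++ [(m:Int)] := by
      rw [show ((m+1:Nat):Int) = (m:Int) + 1 by push_cast; ring]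
      exact PySem.List.pyRange_one_succ_right (by positivity)
    rw [hsplit, List.foldl_append, ih (by omega)]
    simp only [List.foldl_cons, List.foldl_nil]
    set done := (List.range m).map (fun it => rUp it n n) with hdone
    have hd : done.length = m := by simp [hdone]
    have hrest : List.replicate (n - m) (List.replicate n (1:Int))
        = List.replicate n (1:Int) :: List.replicate (n - (m+1)) (List.replicate n 1) := by
      rw [show n - m = (n - (m+1)) + 1 by omega, List.replicate_succ]
    have hprev : m ≠ 0 →
        PySem.List.pyGetD (PySem.List.pyGetD done ((m:Int)-1) []) 1 0 = (2:Int)^m := by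
      intro hm
      have hc : ((m:Int) - 1) = ((m - 1 : Nat) : Int) := by omega
      have h1 : PySem.List.pyGetD done ((m:Int)-1) [] = rUp (m-1) n n := by
        rw [hc, PySem.List.pyGetD_natCast,
            List.getD_eq_getElem _ _ (by simp [hdone]; omega)]
        simp [hdone, show m - 1 < m by omega]
      rw [h1, PySem.List.pyGetD_eq_getElem (rUp (m-1) n n) 0 (by norm_num)
            (by rw [length_rUp]; omega)]
      simp only [rUp, Int.toNat_one, List.getElem_map, List.getElem_range]
      rw [if_pos (by omega)]
      congr 1
      omega
    rw [hrest]
    simp only [pvOuter]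
    rw [inner_fold n m done _ hd (by omega) hprev n le_rfl]
    rw [if_neg (by omega), List.range_succ, List.map_append]
    simp
    exact hdone

-- assemble: both ports compute row i = [2^(i+t) | t < n]
theorem ports_agree (num : Int) : cria_matriz num = cria_matriz_alt num := by
  by_cases h : num ≤ 0
  · have hnil : PySem.List.pyRange 0 num 1 = [] := PySem.List.pyRange_one_eq_nil h
    simp [cria_matriz, cria_matriz_alt, hnil]
  · obtain ⟨n, rfl⟩ : ∃ n : Nat, num = (n:Nat) := ⟨num.toNat, by omega⟩
    unfold cria_matriz cria_matriz_alt
    have hinit : (PySem.List.pyRange 0 (n:Int) 1).map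
        (fun _ => List.replicate ((n:Int)).toNat (1:Int))
        = List.replicate n (List.replicate n 1) := by
      rw [List.map_const']
      simp [PySem.List.length_pyRange_one]
    rw [hinit]
    have houter := outer_fold n n le_rfl
    rw [houter, Nat.sub_self, List.replicate_zero, List.append_nil]
    rw [PySem.List.pyRange_one]
    simp only [Int.sub_zero, Int.toNat_natCast, List.map_map, Function.comp_apply, zero_add]
    apply List.map_congr_left
    intro it hit
    simp only [Function.comp_apply, rUp, List.map_map]
    apply List.map_congr_left
    intro t ht
    simp only [List.mem_range] at hit ht
    simp only [Function.comp_apply]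
    rw [if_pos ht, show (((it:Nat):Int) + ((t:Nat):Int)).toNat = it + t from by omega]

-- ===== VERDICT (by name: the statement is the Claim_ definition above) =====
theorem cria_matriz_spec : Claim_equal_cria_matriz := by
  unfold Claim_equal_cria_matriz Spec_cria_matriz
  intro num _
  exact ports_agree num
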